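-- pv_equiv track=rewrite | github.com/TristanLee187/CPPython | Codeforces/CompetitionRounds/ER90/ProblemB.py | homosubstrings
-- ===== SOURCE A (Python) =====
-- def homosubstrings(s, c):
--     '''Returns a list of the lengths of the contiguous substrings of character c in string s'''
--     n=len(s)
--     spaces=[]
--     i=0
--     found=False
--     while i<n:
--         if s[i]!=c:
--             spaces.append(i)
--             found=True
--         i+=1
--     tspaces=[]
--     if found:
--         i=1
--         if spaces[0]!=0:
--             tspaces.append(spaces[0])
--         while i<len(spaces):
--             if spaces[i]-spaces[i-1]-1!=0:
--                 tspaces.append(spaces[i]-spaces[i-1]-1)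
--             i+=1
--         if spaces[-1]!=n-1 and n-1-spaces[-1]!=0:
--             tspaces.append(n-1-spaces[-1])
--     elif i!=0:
--         tspaces.append(i)
--     return tspaces
-- ===== SOURCE B (Python) =====
-- def homosubstrings(s, c):
--     '''Returns a list of the lengths of the contiguous substrings of character c in string s'''
--     res = []
--     cnt = 0
--     for ch in s:
--         if ch == c:
--             cnt += 1
--         else:
--             if cnt > 0:
--                 res.append(cnt)
--             cnt = 0
--     if cnt > 0:
--         res.append(cnt)
--     return res
-- ===== Notes on version B (the rewrite author's own statement) =====
-- stated objective: simpler
-- what changed: B does one linear pass with a run-length counter flushed on each non-c character, instead of building the list of indices of non-c characters and then differencing consecutive indices with separate prefix/suffix cases.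
import Mathlib
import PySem

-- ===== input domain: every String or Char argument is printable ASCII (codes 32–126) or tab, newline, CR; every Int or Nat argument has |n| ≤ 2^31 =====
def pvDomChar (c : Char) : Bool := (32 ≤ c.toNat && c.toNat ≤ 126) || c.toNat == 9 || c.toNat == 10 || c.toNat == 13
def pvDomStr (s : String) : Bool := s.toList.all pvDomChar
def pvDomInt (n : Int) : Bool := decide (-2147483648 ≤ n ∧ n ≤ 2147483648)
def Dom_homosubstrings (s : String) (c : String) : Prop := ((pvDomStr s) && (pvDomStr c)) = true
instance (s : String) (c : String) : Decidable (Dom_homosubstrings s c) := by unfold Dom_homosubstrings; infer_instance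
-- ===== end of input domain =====

-- B replaces A's build-index-list-then-difference algorithm by a single pass with a
-- run-length counter (objective: simpler); return values are proved equal on all inputs.

-- ===== PORT A =====
-- first while loop of A: collect indices of characters ≠ c, and the 'found' flag
def pvGoSpaces (c : String) : List Char → Int → List Int → Bool → List Int × Bool
  | [], _, sp, f => (sp, f)
  | x :: xs, i, sp, f =>
    if String.mk [x] ≠ c then pvGoSpaces c xs (i + 1) (sp ++ [i]) true
    else pvGoSpaces c xs (i + 1) sp f

-- second while loop of A: differences of consecutive indices, skipping zero gaps
def pvGoGaps : Int → List Int → List Int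
  | _, [] => []
  | prev, x :: xs => (if x - prev - 1 ≠ 0 then [x - prev - 1] else []) ++ pvGoGaps x xs

-- spaces[-1] (last element; the default is never used since A indexes only when found)
def pvLastI : Int → List Int → Int
  | d, [] => d
  | _, x :: xs => pvLastI x xs

def homosubstrings (s : String) (c : String) : List Int :=
  match pvGoSpaces c s.toList 0 [] false with
  | (spaces, found) =>
    if found then
      match spaces with
      | [] => []   -- unreachable: found = true forces spaces ≠ [] (Python would raise only here)
      | s0 :: rest =>
          (if s0 ≠ 0 then [s0] else []) ++ pvGoGaps s0 rest ++
            (if pvLastI s0 rest ≠ (s.toList.length : Int) - 1 ∧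
                (s.toList.length : Int) - 1 - pvLastI s0 rest ≠ 0
             then [(s.toList.length : Int) - 1 - pvLastI s0 rest] else [])
    else if (s.toList.length : Int) ≠ 0 then [(s.toList.length : Int)] else []

-- ===== PORT B =====
-- B's for-loop: run-length counter, flushed on non-matching characters and at the end
def pvRun (c : String) : List Char → List Int → Int → List Int
  | [], acc, cnt => acc ++ (if cnt > 0 then [cnt] else [])
  | x :: xs, acc, cnt =>
    if String.mk [x] = c then pvRun c xs acc (cnt + 1)
    else pvRun c xs (acc ++ (if cnt > 0 then [cnt] else [])) 0

def homosubstrings_alt (s : String) (c : String) : List Int := pvRun c s.toList [] 0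

-- ===== PRECONDITION & SPEC =====
def Spec_homosubstrings (s : String) (c : String) (out : List Int) : Prop := out = homosubstrings_alt s c
instance (s : String) (c : String) (out : List Int) : Decidable (Spec_homosubstrings s c out) := by unfold Spec_homosubstrings; infer_instance

-- ===== CLAIM (what is proved, stated in full; the proofs are below) =====
def Claim_equal_homosubstrings : Prop := ∀ (s : String) (c : String), Dom_homosubstrings s c → Spec_homosubstrings s c (homosubstrings s c)

-- ===== LEMMAS AND PROOFS =====

-- index list of non-matching characters, positions relative to the front
def pvSpaces0 (c : String) : List Char → List Int
  | [] => []
  | x :: xs => (if String.mk [x] ≠ c then [(0 : Int)] else []) ++ (pvSpaces0 c xs).map (· + 1)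

def pvFound (c : String) (l : List Char) : Bool := l.any (fun x => String.mk [x] ≠ c)

-- recursive form of B's result given a pending counter
def pvBres (c : String) : Int → List Char → List Int
  | cnt, [] => if cnt > 0 then [cnt] else []
  | cnt, x :: xs =>
    if String.mk [x] = c then pvBres c (cnt + 1) xs
    else (if cnt > 0 then [cnt] else []) ++ pvBres c 0 xs

-- A's phase-2 computation on an index list (empty list ↔ A's not-found branch)
def pvPhase2 (sp : List Int) (n : Int) : List Int :=
  match sp with
  | [] => if n ≠ 0 then [n] else []
  | s0 :: rest =>
      (if s0 ≠ 0 then [s0] else []) ++ pvGoGaps s0 rest ++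
        (if pvLastI s0 rest ≠ n - 1 ∧ n - 1 - pvLastI s0 rest ≠ 0
         then [n - 1 - pvLastI s0 rest] else [])

theorem pvMapShift (L : List Int) (i : Int) :
    (L.map (· + 1)).map (· + i) = L.map (· + (i + 1)) := by
  rw [List.map_map]
  apply List.map_congr_left
  intro a _
  show a + 1 + i = a + (i + 1)
  ring

theorem pvGoSpaces_eq (c : String) (l : List Char) : ∀ (i : Int) (sp : List Int) (f : Bool),
    pvGoSpaces c l i sp f = (sp ++ (pvSpaces0 c l).map (· + i), f || pvFound c l) := by
  induction l with
  | nil => intro i sp f; simp [pvGoSpaces, pvSpaces0, pvFound]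
  | cons x xs ih =>
    intro i sp f
    by_cases h : String.mk [x] = c
    · have hne : ¬ (String.mk [x] ≠ c) := by simp [h]
      have hs : pvSpaces0 c (x :: xs) = (pvSpaces0 c xs).map (· + 1) := by
        simp [pvSpaces0, h]
      have hf2 : pvFound c (x :: xs) = pvFound c xs := by simp [pvFound, h]
      simp only [pvGoSpaces, if_neg hne]
      rw [ih, hs, hf2, pvMapShift]
    · have hs : pvSpaces0 c (x :: xs) = 0 :: (pvSpaces0 c xs).map (· + 1) := by
        simp [pvSpaces0, h]
      have hf2 : pvFound c (x :: xs) = true := by simp [pvFound, h]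
      simp only [pvGoSpaces, if_pos (show String.mk [x] ≠ c from h)]
      rw [ih, hs, hf2, List.map_cons, pvMapShift]
      simp [List.append_assoc]

theorem pvGoGaps_shift (sp : List Int) : ∀ (prev d : Int),
    pvGoGaps prev (sp.map (· + d)) = pvGoGaps (prev - d) sp := by
  induction sp with
  | nil => intro prev d; simp [pvGoGaps]
  | cons x xs ih =>
    intro prev d
    simp only [List.map_cons, pvGoGaps]
    rw [show x + d - prev - 1 = x - (prev - d) - 1 from by ring, ih,
      show x + d - d = x from by ring]

theorem pvLastI_shift (sp : List Int) : ∀ (prev d : Int),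
    pvLastI prev (sp.map (· + d)) = pvLastI (prev - d) sp + d := by
  induction sp with
  | nil => intro prev d; simp [pvLastI]
  | cons x xs ih =>
    intro prev d
    simp only [List.map_cons, pvLastI]
    rw [ih, show x + d - d = x from by ring]

theorem pvPhase2_tail (sp : List Int) (n : Int) (hn : 0 ≤ n) :
    pvGoGaps (-1) sp ++
      (if pvLastI (-1) sp ≠ n - 1 ∧ n - 1 - pvLastI (-1) sp ≠ 0
       then [n - 1 - pvLastI (-1) sp] else [])
    = pvPhase2 sp n := by
  cases sp with
  | nil =>
    simp only [pvGoGaps, pvLastI, pvPhase2, List.nil_append]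
    split_ifs with h1 h2 h2
    · simp only [List.cons.injEq, and_true]; omega
    · omega
    · omega
    · rfl
  | cons s0 rest =>
    simp only [pvGoGaps, pvLastI, pvPhase2]
    rw [show s0 - (-1) - 1 = s0 from by ring, List.append_assoc]

theorem pvMain (c : String) (l : List Char) : ∀ (cnt : Int), 0 ≤ cnt →
    pvPhase2 ((pvSpaces0 c l).map (· + cnt)) ((l.length : Int) + cnt) = pvBres c cnt l := by
  induction l with
  | nil =>
    intro cnt hcnt
    simp only [pvSpaces0, List.map_nil, pvPhase2, pvBres, List.length_nil, Int.natCast_zero,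
      zero_add]
    split_ifs <;> first | rfl | omega
  | cons x xs ih =>
    intro cnt hcnt
    by_cases h : String.mk [x] = c
    · -- matching character: run continues
      have hs : pvSpaces0 c (x :: xs) = (pvSpaces0 c xs).map (· + 1) := by
        simp [pvSpaces0, h]
      have hl : ((x :: xs).length : Int) + cnt = (xs.length : Int) + (cnt + 1) := by
        push_cast [List.length_cons]; ring
      rw [hs, pvMapShift, hl, ih (cnt + 1) (by omega)]
      simp [pvBres, h]
    · -- non-matching character: flush the counter
      have hs : pvSpaces0 c (x :: xs) = 0 :: (pvSpaces0 c xs).map (· + 1) := by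
        simp [pvSpaces0, h]
      rw [hs, List.map_cons, pvMapShift]
      simp only [pvPhase2, zero_add, pvBres, if_neg h]
      have hpre : (if cnt ≠ 0 then [cnt] else ([] : List Int))
          = (if cnt > 0 then [cnt] else []) := by
        by_cases hc : cnt = 0
        · subst hc; simp
        · simp [hc, show cnt > 0 from by omega]
      rw [hpre, List.append_assoc]
      congr 1
      rw [pvGoGaps_shift, pvLastI_shift, show cnt - (cnt + 1) = -1 from by ring]
      have hb : pvBres c 0 xs = pvPhase2 (pvSpaces0 c xs) ((xs.length : Int)) := by
        have h0 := ih 0 (by omega)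
        simp only [add_zero] at h0
        rw [← h0]
        congr 1
        simp
      rw [hb, ← pvPhase2_tail (pvSpaces0 c xs) ((xs.length : Int)) (by positivity)]
      congr 1
      rw [show ((x :: xs).length : Int) + cnt = (xs.length : Int) + 1 + cnt from by
        push_cast [List.length_cons]; ring]
      split_ifs with h1 h2 h2
      · simp only [List.cons.injEq, and_true]; omega
      · omega
      · omega
      · rfl

theorem pvRun_eq (c : String) (l : List Char) : ∀ (acc : List Int) (cnt : Int),
    pvRun c l acc cnt = acc ++ pvBres c cnt l := by
  induction l with
  | nil => intro acc cnt; simp [pvRun, pvBres]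
  | cons x xs ih =>
    intro acc cnt
    by_cases h : String.mk [x] = c
    · simp only [pvRun, pvBres, if_pos h]; rw [ih]
    · simp only [pvRun, pvBres, if_neg h]; rw [ih, List.append_assoc]

theorem pvFound_iff (c : String) (l : List Char) : pvFound c l = false ↔ pvSpaces0 c l = [] := by
  induction l with
  | nil => simp [pvFound, pvSpaces0]
  | cons x xs ih =>
    by_cases h : String.mk [x] = c
    · simp [pvFound, pvSpaces0, h] at ih ⊢
      exact ih
    · simp [pvFound, pvSpaces0, h]

-- ===== VERDICT (by name: the statement is the Claim_ definition above) =====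
theorem homosubstrings_spec : Claim_equal_homosubstrings := by
  intro s c _
  unfold Spec_homosubstrings homosubstrings homosubstrings_alt
  rw [pvRun_eq, pvGoSpaces_eq]
  simp only [List.nil_append, Bool.false_or]
  have hmain := pvMain c s.toList 0 (by omega)
  have hid : (pvSpaces0 c s.toList).map (· + (0 : Int)) = pvSpaces0 c s.toList := by simp
  rw [hid, add_zero] at hmain
  rw [← hmain]
  cases hf : pvFound c s.toList with
  | false =>
    have hsp : pvSpaces0 c s.toList = [] := (pvFound_iff c s.toList).mp hf
    simp [hsp, pvPhase2]
  | true =>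
    cases hsplit : pvSpaces0 c s.toList with
    | nil =>
      have := (pvFound_iff c s.toList).mpr hsplit
      simp [hf] at this
    | cons s0 rest => simp [pvPhase2]
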